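-- pv_equiv track=rewrite | github.com/HoChangSUNG/sparta_algorithm | week_2/homework/slack_problem_baguette_slice.py | baguette_slice
-- ===== SOURCE A (Python) =====
-- def baguette_slice(array,need) :
--     start = 0
--     end = max(array)
--     baguette_amount=0
--     mid = (start+end) // 2
--     while start <= end :
--         baguette_amount = 0
--         for arr in array :
--             if arr - mid >0 :
--                 baguette_amount += (arr - mid)
--         if baguette_amount >= need :
--             start=mid+1
--         else :
--             end=mid-1
--         mid = (start + end) // 2
--
--     return mid
-- ===== SOURCE B (Python) =====
-- def baguette_slice(array, need):
--     xs = sorted(array)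
--     n = len(xs)
--     prefix = [0]
--     for x in xs:
--         prefix.append(prefix[-1] + x)
--
--     def cut(h):
--         # first index whose element exceeds h (xs is sorted ascending)
--         lo, hi = 0, n
--         while lo < hi:
--             m = (lo + hi) // 2
--             if xs[m] > h:
--                 hi = m
--             else:
--                 lo = m + 1
--         return (prefix[n] - prefix[lo]) - (n - lo) * h
--
--     lo, hi, best = 0, xs[-1], -1
--     while lo <= hi:
--         m = (lo + hi) // 2
--         if cut(m) >= need:
--             best = m
--             lo = m + 1
--         else:
--             hi = m - 1
--     return best
-- ===== Notes on version B (the rewrite author's own statement) =====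
-- stated objective: alternative
-- what changed: Replaces A's O(n) rescan of the whole array at every binary-search step by sorting once with prefix sums, evaluating each candidate height with an inner binary search, and returning the best feasible height found instead of A's leftover mid.
-- intended difference: On nonempty arrays whose elements are all <= -3 (no height in [0, max] exists, the search loop never runs) A returns floor(max/2), a leftover of its pre-loop mid, while B returns -1, the same 'impossible' sentinel A itself returns whenever need is unsatisfiable on ordinary input. — e.g. on baguette_slice([-5], 0): A returns -3, B returns -1
import Mathlib
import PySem

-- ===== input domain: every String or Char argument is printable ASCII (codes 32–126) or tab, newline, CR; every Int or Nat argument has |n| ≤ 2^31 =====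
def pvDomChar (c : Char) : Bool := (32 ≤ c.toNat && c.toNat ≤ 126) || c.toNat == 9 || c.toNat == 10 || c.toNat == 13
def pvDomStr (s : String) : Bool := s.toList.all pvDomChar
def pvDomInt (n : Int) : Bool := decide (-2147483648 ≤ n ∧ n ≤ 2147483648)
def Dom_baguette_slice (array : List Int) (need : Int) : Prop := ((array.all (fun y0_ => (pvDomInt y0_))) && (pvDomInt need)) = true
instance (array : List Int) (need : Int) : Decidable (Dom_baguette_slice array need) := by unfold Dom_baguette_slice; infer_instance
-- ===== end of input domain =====

-- B replaces A's per-step rescan of the whole array by sorting once with prefix sums and an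
-- inner binary search per candidate height, and returns the best feasible height found
-- (-1 when none) instead of A's leftover pre-loop mid.
-- (The Nat fuel on each loop is a totality guard only: it is chosen large enough that the
-- loop always exits through its own condition first.)

-- ===== PORT A =====
def baguetteLoopA (array : List Int) (need : Int) (fuel : Nat) (s e : Int) : Int :=
  match fuel with
  | 0 => PySem.Int.floordiv (s + e) 2
  | fuel + 1 =>
    let mid := PySem.Int.floordiv (s + e) 2
    if s ≤ e then
      let amount := array.foldl (fun acc arr => if arr - mid > 0 then acc + (arr - mid) else acc) 0
      if amount ≥ need then
        baguetteLoopA array need fuel (mid + 1) e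
      else
        baguetteLoopA array need fuel s (mid - 1)
    else mid

def baguette_slice (array : List Int) (need : Int) : Int :=
  match PySem.List.max? array (fun x => x) with
  | some e => baguetteLoopA array need ((e + 1).toNat + 1) 0 e
  | none => 0  -- Python: max([]) raises ValueError; excluded by Pre_

-- ===== PORT B =====
-- inner while loop of cut(): first index (in sorted xs) whose element exceeds h
def altCount (xs : List Int) (h : Int) (fuel : Nat) (lo hi : Int) : Int :=
  match fuel with
  | 0 => lo
  | fuel + 1 =>
    if lo < hi then
      let m := PySem.Int.floordiv (lo + hi) 2
      if PySem.List.pyGetD xs m 0 > h then altCount xs h fuel lo m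
      else altCount xs h fuel (m + 1) hi
    else lo

-- cut(h) = (prefix[n] - prefix[lo]) - (n - lo) * h
def altCut (xs pre : List Int) (n h : Int) : Int :=
  let lo := altCount xs h (n.toNat + 1) 0 n
  (PySem.List.pyGetD pre n 0 - PySem.List.pyGetD pre lo 0) - (n - lo) * h

-- outer while loop, keeping the best feasible height found
def altSearch (xs pre : List Int) (n need : Int) (fuel : Nat) (lo hi best : Int) : Int :=
  match fuel with
  | 0 => best
  | fuel + 1 =>
    if lo ≤ hi then
      let m := PySem.Int.floordiv (lo + hi) 2
      if altCut xs pre n m ≥ need then altSearch xs pre n need fuel (m + 1) hi m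
      else altSearch xs pre n need fuel lo (m - 1) best
    else best

def baguette_slice_alt (array : List Int) (need : Int) : Int :=
  let xs := PySem.List.sorted array (fun x => x) false
  let n : Int := (xs.length : Int)
  let pre := xs.foldl (fun acc x => acc ++ [PySem.List.pyGetD acc (-1) 0 + x]) [0]
  let hi := PySem.List.pyGetD xs (-1) 0
  altSearch xs pre n need ((hi + 1).toNat + 1) 0 hi (-1)

-- ===== PRECONDITION & SPEC =====
-- Pre_ excludes only the empty list, on which A raises ValueError (max of an empty sequence).
def Pre_baguette_slice (array : List Int) (need : Int) : Prop := array ≠ []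
instance (array : List Int) (need : Int) : Decidable (Pre_baguette_slice array need) := by
  unfold Pre_baguette_slice; infer_instance

def pvWitness_baguette_slice : List Int × Int := ([3, 1, 2], 2)

-- On nonempty arrays whose elements are all ≤ -3 (no height in [0, max] exists, so the
-- search loop never runs) A returns floor(max/2), a leftover of its pre-loop mid, while B
-- returns -1 — the same 'impossible' sentinel A itself returns whenever need is
-- unsatisfiable on ordinary input.
def D_baguette_slice (array : List Int) (need : Int) : Prop :=
  array ≠ [] ∧ ∀ x ∈ array, x ≤ -3
instance (array : List Int) (need : Int) : Decidable (D_baguette_slice array need) := by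
  unfold D_baguette_slice; infer_instance

def Spec_baguette_slice (array : List Int) (need : Int) (out : Int) : Prop :=
  ¬ D_baguette_slice array need → out = baguette_slice_alt array need
instance (array : List Int) (need : Int) (out : Int) : Decidable (Spec_baguette_slice array need out) := by
  unfold Spec_baguette_slice; infer_instance

def pvDiffWitness_baguette_slice : List Int × Int := ([-5], 0)
def pvDiffWitnessOut_baguette_slice : Int × Int := (-3, -1)

-- ===== CLAIM (what is proved, stated in full; the proofs are below) =====
def Claim_unchanged_baguette_slice : Prop := ∀ (array : List Int) (need : Int), Dom_baguette_slice array need → Pre_baguette_slice array need → Spec_baguette_slice array need (baguette_slice array need)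
def Claim_changed_baguette_slice : Prop := Dom_baguette_slice (pvDiffWitness_baguette_slice.1) (pvDiffWitness_baguette_slice.2) ∧ Pre_baguette_slice (pvDiffWitness_baguette_slice.1) (pvDiffWitness_baguette_slice.2) ∧ D_baguette_slice (pvDiffWitness_baguette_slice.1) (pvDiffWitness_baguette_slice.2) ∧ baguette_slice (pvDiffWitness_baguette_slice.1) (pvDiffWitness_baguette_slice.2) = pvDiffWitnessOut_baguette_slice.1 ∧ baguette_slice_alt (pvDiffWitness_baguette_slice.1) (pvDiffWitness_baguette_slice.2) = pvDiffWitnessOut_baguette_slice.2 ∧ pvDiffWitnessOut_baguette_slice.1 ≠ pvDiffWitnessOut_baguette_slice.2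
def Claim_exact_baguette_slice : Prop := ∀ (array : List Int) (need : Int), Dom_baguette_slice array need → Pre_baguette_slice array need → D_baguette_slice array need → baguette_slice array need ≠ baguette_slice_alt array need

-- ===== LEMMAS AND PROOFS =====

-- A's inner for-loop as a sum
lemma cutA_eq_sum (array : List Int) (mid : Int) :
    array.foldl (fun acc arr => if arr - mid > 0 then acc + (arr - mid) else acc) 0
      = (array.map (fun a => if a - mid > 0 then a - mid else 0)).sum := by
  have hf : (fun (acc arr : Int) => if arr - mid > 0 then acc + (arr - mid) else acc)
      = (fun acc arr => acc + (if arr - mid > 0 then arr - mid else 0)) := by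
    funext acc arr
    by_cases h : arr - mid > 0
    · rw [if_pos h, if_pos h]
    · rw [if_neg h, if_neg h, add_zero]
  rw [hf, PySem.List.foldl_add, zero_add]

-- the prefix list B builds is the list of partial sums
lemma pre_eq (xs : List Int) :
    xs.foldl (fun acc x => acc ++ [PySem.List.pyGetD acc (-1) 0 + x]) [0]
      = (List.range (xs.length + 1)).map (fun k => (xs.take k).sum) := by
  induction xs using List.reverseRecOn with
  | nil => simp
  | append_singleton ys x ih =>
    rw [List.foldl_append, ih]
    simp only [List.foldl_cons, List.foldl_nil, List.length_append, List.length_cons,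
      List.length_nil]
    rw [List.range_succ (n := ys.length + 1), List.map_append]
    congr 1
    · apply List.map_congr_left
      intro k hk
      have hk' : k ≤ ys.length := by have := List.mem_range.mp hk; omega
      rw [List.take_append_of_le_length hk']
    · have hP : (List.range (ys.length + 1)).map (fun k => (ys.take k).sum)
          = (List.range ys.length).map (fun k => (ys.take k).sum) ++ [(ys.take ys.length).sum] := by
        rw [List.range_succ, List.map_append]; rfl
      rw [hP, PySem.List.pyGetD_neg_one_append_singleton]
      have : (ys ++ [x]).take (ys.length + 1) = ys ++ [x] :=
        List.take_of_length_le (by simp)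
      simp [this]

-- B's inner binary search finds the boundary index of the elements exceeding h
lemma altCount_spec (xs : List Int) (h : Int) (hsort : xs.Pairwise (· ≤ ·)) :
    ∀ (fuel : Nat) (a b : Nat), b - a < fuel → a ≤ b → b ≤ xs.length →
    (∀ i (_ : i < xs.length), i < a → xs[i] ≤ h) →
    (∀ i (_ : i < xs.length), b ≤ i → h < xs[i]) →
    ∃ c : Nat, altCount xs h fuel (a : Int) (b : Int) = (c : Int) ∧ a ≤ c ∧ c ≤ b ∧
      (∀ i (_ : i < xs.length), i < c → xs[i] ≤ h) ∧
      (∀ i (_ : i < xs.length), c ≤ i → h < xs[i]) := by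
  intro fuel
  induction fuel with
  | zero => intro a b hf; omega
  | succ f IH =>
    intro a b hf hab hbl hlow hhigh
    rw [altCount]
    by_cases hlt : (a : Int) < (b : Int)
    · rw [if_pos hlt]
      have habn : a < b := by exact_mod_cast hlt
      have h1 := PySem.Int.floordiv_mul_add_mod ((a : Int) + (b : Int)) 2
      have h2 := PySem.Int.mod_nonneg ((a : Int) + (b : Int)) (by norm_num : (0:Int) < 2)
      have h3 := PySem.Int.mod_lt ((a : Int) + (b : Int)) (by norm_num : (0:Int) < 2)
      set m : Int := PySem.Int.floordiv ((a : Int) + (b : Int)) 2 with hm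
      have hm0 : 0 ≤ m := by omega
      have hmlt : m < (b : Int) := by omega
      have hmge : (a : Int) ≤ m := by omega
      set mN : Nat := m.toNat with hmN
      have hmcast : (mN : Int) = m := Int.toNat_of_nonneg hm0
      have hmlen : mN < xs.length := by omega
      have hget : PySem.List.pyGetD xs m 0 = xs[mN] := by
        rw [PySem.List.pyGetD_eq_getElem xs (0:Int) hm0 (by omega)]
      have hpw := List.pairwise_iff_getElem.mp hsort
      by_cases hx : PySem.List.pyGetD xs m 0 > h
      · rw [if_pos hx]
        have hxh : h < xs[mN] := by rwa [hget] at hx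
        have := IH a mN (by omega) (by omega) (by omega) hlow ?_
        · obtain ⟨c, hc, hc1, hc2, hc3, hc4⟩ := this
          rw [hmcast] at hc
          exact ⟨c, hc, hc1, by omega, hc3, hc4⟩
        · intro i hi hmi
          rcases Nat.eq_or_lt_of_le hmi with rfl | hlt'
          · exact hxh
          · exact hxh.trans_le (hpw mN i hmlen hi hlt')
      · rw [if_neg hx]
        have hxh : xs[mN] ≤ h := by rw [hget] at hx; omega
        have := IH (mN + 1) b (by omega) (by omega) hbl ?_ hhigh
        · obtain ⟨c, hc, hc1, hc2, hc3, hc4⟩ := this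
          rw [show ((mN + 1 : Nat) : Int) = m + 1 by omega] at hc
          exact ⟨c, hc, by omega, hc2, hc3, hc4⟩
        · intro i hi hia
          rcases Nat.lt_succ_iff_lt_or_eq.mp hia with hlt' | rfl
          · exact (hpw i mN hi hmlen hlt').trans hxh
          · exact hxh
    · rw [if_neg hlt]
      have : a = b := by omega
      subst this
      exact ⟨a, rfl, le_refl a, le_refl a, hlow, hhigh⟩

-- B's cut (via prefix sums) computes A's inner for-loop
lemma altCut_eq (array xs : List Int) (hperm : xs.Perm array)
    (hsort : xs.Pairwise (· ≤ ·)) (h : Int) :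
    altCut xs ((List.range (xs.length + 1)).map (fun k => (xs.take k).sum)) (xs.length : Int) h
      = array.foldl (fun acc arr => if arr - h > 0 then acc + (arr - h) else acc) 0 := by
  obtain ⟨c, hc, _, hcb, hle, hgt⟩ := altCount_spec xs h hsort (xs.length + 1) 0 xs.length
    (by omega) (Nat.zero_le _) le_rfl (by omega) (by intro i hi hbi; omega)
  rw [cutA_eq_sum]
  have hPget : ∀ k : Nat, k ≤ xs.length →
      PySem.List.pyGetD ((List.range (xs.length + 1)).map (fun k => (xs.take k).sum)) (k : Int) 0
        = (xs.take k).sum := by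
    intro k hk
    rw [PySem.List.pyGetD_eq_getElem _ (0:Int) (by positivity) (by simp; omega)]
    simp
  simp only [altCut]
  rw [show altCount xs h ((xs.length : Int).toNat + 1) 0 (xs.length : Int) = (c : Int) by
    rw [show ((xs.length : Int)).toNat = xs.length by omega]; exact_mod_cast hc]
  rw [hPget xs.length le_rfl, hPget c hcb]
  have hsum : (array.map (fun a => if a - h > 0 then a - h else 0)).sum
      = (xs.map (fun a => if a - h > 0 then a - h else 0)).sum :=
    (List.Perm.sum_eq (hperm.map _)).symm
  rw [hsum]
  conv_rhs => rw [← List.take_append_drop c xs]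
  rw [List.map_append, List.sum_append]
  have htake : ((xs.take c).map (fun a => if a - h > 0 then a - h else 0)).sum = 0 := by
    apply List.sum_eq_zero
    intro y hy
    obtain ⟨a, ha, rfl⟩ := List.mem_map.mp hy
    obtain ⟨i, hi, rfl⟩ := List.mem_iff_getElem.mp ha
    have hil : i < xs.length := by
      have := hi; simp [List.length_take] at this; omega
    have hic : i < c := by have := hi; simp [List.length_take] at this; omega
    rw [List.getElem_take]
    rw [if_neg (by have := hle i hil hic; omega)]
  have hdrop : ((xs.drop c).map (fun a => if a - h > 0 then a - h else 0)).sum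
      = (xs.drop c).sum - ((xs.length - c : Nat) : Int) * h := by
    have hmap : (xs.drop c).map (fun a => if a - h > 0 then a - h else 0)
        = (xs.drop c).map (fun a => a + (-h)) := by
      apply List.map_congr_left
      intro a ha
      obtain ⟨i, hi, rfl⟩ := List.mem_iff_getElem.mp ha
      have hil : c + i < xs.length := by have := hi; simp [List.length_drop] at this; omega
      rw [List.getElem_drop]
      have := hgt (c + i) hil (by omega)
      rw [if_pos (by omega)]; omega
    rw [hmap]
    have := PySem.List.sum_map_add_int (xs.drop c) (fun a => a) (fun _ => -h)
    simp only [List.map_id'] at this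
    rw [this, PySem.List.sum_map_const_int]
    simp [List.length_drop]
    ring
  rw [htake, hdrop]
  have hts : (xs.take c).sum + (xs.drop c).sum = xs.sum := List.sum_take_add_sum_drop xs c
  have hxl : xs.take xs.length = xs := List.take_of_length_le le_rfl
  rw [hxl]
  rw [Nat.cast_sub hcb]
  omega

-- the two outer binary-search loops run in lockstep; B's best equals lo - 1 throughout
lemma search_eq (array xs pre : List Int) (n need : Int)
    (hcut : ∀ m, altCut xs pre n m
      = array.foldl (fun acc arr => if arr - m > 0 then acc + (arr - m) else acc) 0) :
    ∀ (fuel : Nat) (s e : Int), (e - s + 1).toNat < fuel → s ≤ e + 1 →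
      baguetteLoopA array need fuel s e = altSearch xs pre n need fuel s e (s - 1) := by
  intro fuel
  induction fuel with
  | zero => intro s e hf; omega
  | succ f IH =>
    intro s e hf hse
    rw [baguetteLoopA, altSearch]
    by_cases hle : s ≤ e
    · rw [if_pos hle, if_pos hle]
      simp only [ge_iff_le]
      have hb := PySem.Int.floordiv_two_mid_bounds (lo := s) (hi := e) hle
      set m := PySem.Int.floordiv (s + e) 2 with hm
      rw [hcut m]
      by_cases hc : need ≤ array.foldl (fun acc arr => if arr - m > 0 then acc + (arr - m) else acc) 0
      · rw [if_pos hc, if_pos hc]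
        have := IH (m + 1) e (by omega) (by omega)
        rw [this]
        congr 1
        omega
      · rw [if_neg hc, if_neg hc]
        exact IH s (m - 1) (by omega) (by omega)
    · rw [if_neg hle, if_neg hle]
      have h1 := PySem.Int.floordiv_mul_add_mod (s + e) 2
      have h2 := PySem.Int.mod_nonneg (s + e) (by norm_num : (0:Int) < 2)
      have h3 := PySem.Int.mod_lt (s + e) (by norm_num : (0:Int) < 2)
      omega

-- shared unfolding of the two entry points on a nonempty array
lemma slice_facts (array : List Int) (hpre : array ≠ []) :
    ∃ mx, PySem.List.max? array (fun x => x) = some mx ∧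
      (∀ y ∈ array, y ≤ mx) ∧
      ∀ (need : Int),
        baguette_slice array need = baguetteLoopA array need ((mx + 1).toNat + 1) 0 mx ∧
        baguette_slice_alt array need
          = altSearch (PySem.List.sorted array (fun x => x) false)
              ((PySem.List.sorted array (fun x => x) false).foldl
                (fun acc x => acc ++ [PySem.List.pyGetD acc (-1) 0 + x]) [0])
              (((PySem.List.sorted array (fun x => x) false).length : Int)) need
              ((mx + 1).toNat + 1) 0 mx (-1) := by
  obtain ⟨mx, hmax⟩ : ∃ mx, PySem.List.max? array (fun x => x) = some mx := by
    cases hmc : PySem.List.max? array (fun x => x) with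
    | none => exact absurd ((PySem.List.max?_eq_none_iff array _).mp hmc) hpre
    | some mx => exact ⟨mx, rfl⟩
  set xs := PySem.List.sorted array (fun x => x) false with hxs
  have hperm : xs.Perm array := PySem.List.sorted_perm array _ false
  have hsort : xs.Pairwise (· ≤ ·) := PySem.List.sorted_pairwise array (fun x => x)
  have hxne : xs ≠ [] := by
    rw [Ne, PySem.List.sorted_eq_nil_iff]; exact hpre
  have hlast : PySem.List.pyGetD xs (-1) 0 = xs.getLast hxne := PySem.List.pyGetD_neg_one xs 0 hxne
  have hmxmem : mx ∈ array := PySem.List.max?_mem hmax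
  have hmax_le : ∀ y ∈ array, y ≤ mx := PySem.List.max?_isMax hmax
  have hlast_mx : xs.getLast hxne = mx := by
    apply le_antisymm
    · exact hmax_le _ (hperm.mem_iff.mp (List.getLast_mem hxne))
    · obtain ⟨p, hp, hpe⟩ := List.mem_iff_getElem.mp (hperm.mem_iff.mpr hmxmem)
      rw [List.getLast_eq_getElem]
      rcases Nat.lt_or_ge p (xs.length - 1) with h | h
      · calc mx = xs[p] := hpe.symm
          _ ≤ xs[xs.length - 1] := List.pairwise_iff_getElem.mp hsort p _ hp (by omega) h
      · have hpeq : p = xs.length - 1 := by omega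
        subst hpeq; rw [hpe]
  refine ⟨mx, hmax, hmax_le, fun need => ⟨?_, ?_⟩⟩
  · unfold baguette_slice; rw [hmax]
  · show altSearch xs _ _ need (((PySem.List.pyGetD xs (-1) 0) + 1).toNat + 1) 0
      (PySem.List.pyGetD xs (-1) 0) (-1) = _
    rw [hlast, hlast_mx]

theorem baguette_slice_spec : Claim_unchanged_baguette_slice := by
  intro array need _hdom hpre
  unfold Spec_baguette_slice
  intro hnd
  obtain ⟨mx, hmax, hmax_le, hf⟩ := slice_facts array hpre
  obtain ⟨hA, hB⟩ := hf need
  rw [hA, hB]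
  have hperm : (PySem.List.sorted array (fun x => x) false).Perm array :=
    PySem.List.sorted_perm array _ false
  have hsort : (PySem.List.sorted array (fun x => x) false).Pairwise (· ≤ ·) :=
    PySem.List.sorted_pairwise array (fun x => x)
  have hcut : ∀ m, altCut (PySem.List.sorted array (fun x => x) false)
      ((PySem.List.sorted array (fun x => x) false).foldl
        (fun acc x => acc ++ [PySem.List.pyGetD acc (-1) 0 + x]) [0])
      (((PySem.List.sorted array (fun x => x) false).length : Int)) m
      = array.foldl (fun acc arr => if arr - m > 0 then acc + (arr - m) else acc) 0 := by
    intro m; rw [pre_eq]; exact altCut_eq array _ hperm hsort m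
  by_cases hm : -1 ≤ mx
  · have := search_eq array _ _ _ need hcut ((mx + 1).toNat + 1) 0 mx (by omega) (by omega)
    simpa using this
  · have hmx2 : mx = -2 := by
      unfold D_baguette_slice at hnd
      push Not at hnd
      obtain ⟨x, hxm, hx3⟩ := hnd hpre
      have := hmax_le x hxm
      omega
    subst hmx2
    rw [baguetteLoopA, altSearch]
    norm_num

-- ===== VERDICT (by name: the statement is the Claim_ definition above) =====
theorem baguette_slice_changed : Claim_changed_baguette_slice := by
  unfold Claim_changed_baguette_slice; decide

theorem baguette_slice_tight : Claim_exact_baguette_slice := by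
  intro array need _hdom hpre hD
  obtain ⟨mx, hmax, hmax_le, hf⟩ := slice_facts array hpre
  obtain ⟨hA, hB⟩ := hf need
  rw [hA, hB]
  have hmx3 : mx ≤ -3 := hD.2 mx (PySem.List.max?_mem hmax)
  rw [show (mx + 1).toNat + 1 = 0 + 1 by omega]
  rw [baguetteLoopA, altSearch]
  rw [if_neg (by omega : ¬ (0:Int) ≤ mx), if_neg (by omega : ¬ (0:Int) ≤ mx)]
  have h1 := PySem.Int.floordiv_mul_add_mod (0 + mx) 2
  have h2 := PySem.Int.mod_nonneg (0 + mx) (by norm_num : (0:Int) < 2)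
  have h3 := PySem.Int.mod_lt (0 + mx) (by norm_num : (0:Int) < 2)
  omega
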